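-- pv_equiv track=rewrite | github.com/schottflo/reranking | parsing/dep_tree_models/helpers/eval_metrics.py | adjust_the_labels
-- ===== SOURCE A (Python) =====
-- def adjust_the_labels(conllu_str, true_tokens):
--
--     # Set up from the gold file and then match the prediction in
--     new_sent_token_list = []
--     for address, token in true_tokens:
--
--         if isinstance(address, tuple):
--             address = "".join([str(element) for element in address])
--
--         new_sent_token_list.append([str(address), token, *["_" for _ in range(8)]])#, str(new_head), new_label, *["_" for _ in range(2)]]))
--
--     # Split the conllu_str
--     tokens = conllu_str.split(sep="\n")
--
--     for token in tokens:
--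
--         fields = token.split(sep="\t")
--
--         for new_sent_token in new_sent_token_list:
--
--             if fields[0] == new_sent_token[0] and fields[1] == new_sent_token[1]:
--
--                 # Add the head and dependent
--                 new_sent_token[6] = fields[6]
--                 new_sent_token[7] = fields[7]
--
--     token_strs = []
--     for new_sent_token in new_sent_token_list:
--         token_strs.append("\t".join(new_sent_token))
--
--     new_conllu_str = "\n".join(token_strs)
--
--     return new_conllu_str
-- ===== SOURCE B (Python) =====
-- def adjust_the_labels(conllu_str, true_tokens):
--     # Index predicted lines by (address, token) once, then emit gold rows in one pass.
--     heads = {}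
--     for line in conllu_str.split("\n"):
--         f = line.split("\t")
--         if len(f) >= 8:
--             heads[(f[0], f[1])] = (f[6], f[7])
--     rows = []
--     for address, token in true_tokens:
--         if isinstance(address, tuple):
--             address = "".join(str(e) for e in address)
--         addr = str(address)
--         head, label = heads.get((addr, token), ("_", "_"))
--         rows.append("\t".join([addr, token, "_", "_", "_", "_", head, label, "_", "_"]))
--     return "\n".join(rows)
-- ===== Notes on version B (the rewrite author's own statement) =====
-- stated objective: alternative
-- what changed: B builds a dict keyed by (address, token) from the conllu lines in one pass and emits each gold row with a single lookup, replacing A's inner rescan of all gold rows for every conllu line.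
-- outside the precondition, e.g. on adjust_the_labels('1', [((1,), 'x')]): A raises IndexError, B returns '1\tx\t_\t_\t_\t_\t_\t_\t_\t_'; on adjust_the_labels('1\tx\t_\t_', [((1,), 'x')]): A raises IndexError, B returns '1\tx\t_\t_\t_\t_\t_\t_\t_\t_'
import Mathlib
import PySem

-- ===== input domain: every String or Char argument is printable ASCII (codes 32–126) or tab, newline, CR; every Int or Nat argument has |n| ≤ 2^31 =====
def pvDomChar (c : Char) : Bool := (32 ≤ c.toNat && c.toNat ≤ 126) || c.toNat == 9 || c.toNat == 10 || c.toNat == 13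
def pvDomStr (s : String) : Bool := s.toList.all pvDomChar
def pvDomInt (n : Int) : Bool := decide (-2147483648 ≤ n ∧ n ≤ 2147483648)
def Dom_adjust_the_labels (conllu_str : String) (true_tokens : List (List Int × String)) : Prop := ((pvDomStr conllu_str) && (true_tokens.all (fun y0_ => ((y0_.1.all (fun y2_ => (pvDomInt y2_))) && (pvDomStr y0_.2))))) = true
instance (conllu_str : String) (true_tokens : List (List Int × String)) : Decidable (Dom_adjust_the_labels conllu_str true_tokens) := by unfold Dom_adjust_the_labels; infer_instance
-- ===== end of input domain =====

-- B indexes the predicted conllu lines once by (address, token) in a dict and emits each gold row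
-- with a single lookup, instead of A's rescan of all gold rows for every conllu line (objective:
-- alternative single-pass algorithm; not measured as faster).


-- s.split(sep) for a nonempty sep (Python never raises there); exact via PySem.Str.split?
def pvSplit (s sep : String) : List String := (PySem.Str.split? s sep).getD []

-- shared helper: "".join([str(element) for element in address])
def pvAddrStr (a : List Int) : String := PySem.Str.join "" (a.map PySem.Int.toStr)

-- ===== PORT A =====
def adjust_the_labels (conllu_str : String) (true_tokens : List (List Int × String)) : String :=
  let new_sent_token_list : List (List String) :=
    true_tokens.foldl (fun acc p =>
      acc ++ [[pvAddrStr p.1, p.2, "_", "_", "_", "_", "_", "_", "_", "_"]]) []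
  let tokens := pvSplit conllu_str "\n"
  let new_sent_token_list :=
    tokens.foldl (fun rows token =>
      let fields := pvSplit token "\t"
      rows.map (fun row =>
        if fields.getD 0 "" == row.getD 0 "" && fields.getD 1 "" == row.getD 1 "" then
          (row.set 6 (fields.getD 6 "")).set 7 (fields.getD 7 "")
        else row)) new_sent_token_list
  let token_strs :=
    new_sent_token_list.foldl (fun acc row => acc ++ [PySem.Str.join "\t" row]) []
  PySem.Str.join "\n" token_strs

-- ===== PORT B =====
def adjust_the_labels_alt (conllu_str : String) (true_tokens : List (List Int × String)) : String :=
  let heads : PySem.Dict (String × String) (String × String) :=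
    (pvSplit conllu_str "\n").foldl (fun d line =>
      let f := pvSplit line "\t"
      if 8 ≤ f.length then
        d.insert (f.getD 0 "", f.getD 1 "") (f.getD 6 "", f.getD 7 "")
      else d) PySem.Dict.empty
  let rows := true_tokens.map (fun p =>
      let a := pvAddrStr p.1
      let hl := heads.getD (a, p.2) ("_", "_")
      PySem.Str.join "\t" [a, p.2, "_", "_", "_", "_", hl.1, hl.2, "_", "_"])
  PySem.Str.join "\n" rows

-- ===== PRECONDITION & SPEC =====
-- Pre_ excludes exactly the inputs on which Python A raises IndexError: a conllu line whose first
-- field equals some gold address string but has fewer than 2 tab fields (fields[1] raises), or whose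
-- first two fields match a gold (address, token) pair but has fewer than 8 fields (fields[6] raises).
def Pre_adjust_the_labels (conllu_str : String) (true_tokens : List (List Int × String)) : Prop :=
  ∀ line ∈ pvSplit conllu_str "\n",
    ((∃ p ∈ true_tokens, pvAddrStr p.1 = (pvSplit line "\t").getD 0 "") →
        2 ≤ (pvSplit line "\t").length) ∧
    ((∃ p ∈ true_tokens, pvAddrStr p.1 = (pvSplit line "\t").getD 0 "" ∧
        p.2 = (pvSplit line "\t").getD 1 "") →
        8 ≤ (pvSplit line "\t").length)
instance (conllu_str : String) (true_tokens : List (List Int × String)) : Decidable (Pre_adjust_the_labels conllu_str true_tokens) := by unfold Pre_adjust_the_labels; infer_instance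

def pvWitness_adjust_the_labels : String × (List (List Int × String)) :=
  ("1\tdog\t_\t_\t_\t_\t2\tnmod", [([(1 : Int)], "dog")])

def Spec_adjust_the_labels (conllu_str : String) (true_tokens : List (List Int × String)) (out : String) : Prop := out = adjust_the_labels_alt conllu_str true_tokens
instance (conllu_str : String) (true_tokens : List (List Int × String)) (out : String) : Decidable (Spec_adjust_the_labels conllu_str true_tokens out) := by unfold Spec_adjust_the_labels; infer_instance

-- ===== CLAIM (what is proved, stated in full; the proofs are below) =====
def Claim_equal_adjust_the_labels : Prop := ∀ (conllu_str : String) (true_tokens : List (List Int × String)), Dom_adjust_the_labels conllu_str true_tokens → Pre_adjust_the_labels conllu_str true_tokens → Spec_adjust_the_labels conllu_str true_tokens (adjust_the_labels conllu_str true_tokens)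

-- ===== LEMMAS AND PROOFS =====

-- A's line loop maps every gold row independently, so it commutes out to a per-row fold.
theorem pv_foldl_map_comm {a b : Type} (lines : List a) (g : a -> b -> b) (rows : List b) :
    lines.foldl (fun rs l => rs.map (g l)) rows
      = rows.map (fun r => lines.foldl (fun r l => g l r) r) := by
  induction lines generalizing rows with
  | nil => simp
  | cons l ls ih =>
      simp only [List.foldl_cons, ih, List.map_map]
      rfl

-- threading one gold row through A's line loop only ever rewrites slots 6 and 7
theorem pv_row_fold (lines : List String) (a t h l : String) :
    lines.foldl (fun row line =>
        let fields := pvSplit line "\t"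
        if fields.getD 0 "" == row.getD 0 "" && fields.getD 1 "" == row.getD 1 "" then
          (row.set 6 (fields.getD 6 "")).set 7 (fields.getD 7 "")
        else row)
      [a, t, "_", "_", "_", "_", h, l, "_", "_"]
    = [a, t, "_", "_", "_", "_",
        (lines.foldl (fun hl line =>
          let fields := pvSplit line "\t"
          if fields.getD 0 "" == a && fields.getD 1 "" == t then
            (fields.getD 6 "", fields.getD 7 "") else hl) (h, l)).1,
        (lines.foldl (fun hl line =>
          let fields := pvSplit line "\t"
          if fields.getD 0 "" == a && fields.getD 1 "" == t then
            (fields.getD 6 "", fields.getD 7 "") else hl) (h, l)).2,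
        "_", "_"] := by
  induction lines generalizing h l with
  | nil => rfl
  | cons line ls ih =>
      simp only [List.foldl_cons, List.getD, List.getElem?_cons_zero, List.getElem?_cons_succ,
        Option.getD_some, List.set] at ih ⊢
      by_cases hc : ((pvSplit line "\t")[0]?.getD "" == a
          && (pvSplit line "\t")[1]?.getD "" == t) = true
      · simp only [hc, if_true]
        exact ih _ _
      · simp only [hc, Bool.false_eq_true, if_false]
        exact ih _ _

-- B's dict, looked up at one key, is the (head, label) of the last full line matching that key
theorem pv_dict_fold (lines : List String) (d : PySem.Dict (String × String) (String × String))
    (key dflt : String × String) :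
    (lines.foldl (fun d line =>
        let f := pvSplit line "\t"
        if 8 ≤ f.length then
          d.insert (f.getD 0 "", f.getD 1 "") (f.getD 6 "", f.getD 7 "")
        else d) d).getD key dflt
    = lines.foldl (fun hl line =>
        let f := pvSplit line "\t"
        if 8 ≤ f.length ∧ (f.getD 0 "", f.getD 1 "") = key then
          (f.getD 6 "", f.getD 7 "") else hl) (d.getD key dflt) := by
  induction lines generalizing d with
  | nil => rfl
  | cons line ls ih =>
      simp only [List.foldl_cons]
      by_cases h8 : 8 ≤ (pvSplit line "\t").length
      · rw [if_pos h8, ih, PySem.Dict.getD_insert]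
        congr 1
        by_cases hk : ((pvSplit line "\t").getD 0 "", (pvSplit line "\t").getD 1 "") = key
        · rw [if_pos hk.symm, if_pos ⟨h8, hk⟩]
        · rw [if_neg (fun hcon => hk hcon.symm), if_neg (fun hcon => hk hcon.2)]
      · rw [if_neg h8, ih]
        congr 1
        rw [if_neg (fun hcon => h8 hcon.1)]

-- under Pre_, A's per-row update condition agrees with B's per-line dict condition
theorem pv_cond_fold (conllu : String) (toks : List (List Int × String))
    (hpre : Pre_adjust_the_labels conllu toks) (p : List Int × String) (hp : p ∈ toks) :
    (pvSplit conllu "\n").foldl (fun hl line =>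
        let fields := pvSplit line "\t"
        if fields.getD 0 "" == pvAddrStr p.1 && fields.getD 1 "" == p.2 then
          (fields.getD 6 "", fields.getD 7 "") else hl) ("_", "_")
    = (pvSplit conllu "\n").foldl (fun hl line =>
        let f := pvSplit line "\t"
        if 8 ≤ f.length ∧ (f.getD 0 "", f.getD 1 "") = (pvAddrStr p.1, p.2) then
          (f.getD 6 "", f.getD 7 "") else hl) ("_", "_") := by
  refine PySem.List.foldl_congr_mem _ _ _ _ ?_
  intro acc line hline
  simp only []
  by_cases hc : ((pvSplit line "\t").getD 0 "" == pvAddrStr p.1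
      && (pvSplit line "\t").getD 1 "" == p.2) = true
  · rw [if_pos hc]
    simp only [Bool.and_eq_true, beq_iff_eq] at hc
    obtain ⟨h0, h1⟩ := hc
    have h2 : 2 ≤ (pvSplit line "\t").length :=
      (hpre line hline).1 ⟨p, hp, h0.symm⟩
    have h8 : 8 ≤ (pvSplit line "\t").length :=
      (hpre line hline).2 ⟨p, hp, h0.symm, h1.symm⟩
    rw [if_pos ⟨h8, by rw [h0, h1]⟩]
  · rw [if_neg hc]
    rw [if_neg (fun hcon => hc (by
      simp only [Bool.and_eq_true, beq_iff_eq]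
      exact ⟨congrArg Prod.fst hcon.2, congrArg Prod.snd hcon.2⟩))]

-- ===== VERDICT (by name: the statement is the Claim_ definition above) =====
theorem adjust_the_labels_spec : Claim_equal_adjust_the_labels := by
  intro conllu toks _hd hpre
  unfold Spec_adjust_the_labels adjust_the_labels adjust_the_labels_alt
  simp only [PySem.List.foldl_append_singleton_eq_map, List.nil_append]
  rw [pv_foldl_map_comm]
  simp only [List.map_map]
  refine congrArg (PySem.Str.join "\n") (List.map_congr_left ?_)
  intro p hp
  simp only [Function.comp_apply]
  rw [pv_row_fold, pv_dict_fold, PySem.Dict.getD_empty, pv_cond_fold conllu toks hpre p hp]
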